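-- pv_equiv track=rewrite | github.com/yasar11732/ysarnet | utils.py | convert_code
-- ===== SOURCE A (Python) =====
-- def convert_code(string):
-- 	lines = string.splitlines()
-- 	new_lines = []
-- 	code_block = False
-- 	for line in lines:
-- 		if code_block:
-- 			if line.startswith("~~~~"):
-- 				code_block = False
-- 			else:
-- 				new_lines.append("    %s" % line)
-- 		elif line.startswith("~~~~"):
-- 			code_block = True
-- 			new_lines.append("    :::python")
-- 		else:
-- 			new_lines.append(line)
-- 	return "\n".join(new_lines)
-- ===== SOURCE B (Python) =====
-- def convert_code(string):
--     lines = string.splitlines()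
--     fences = [line.startswith("~~~~") for line in lines]
--     counts = []
--     c = 0
--     for f in fences:
--         counts.append(c)
--         c += int(f)
--     out = []
--     for line, f, k in zip(lines, fences, counts):
--         if f:
--             if k % 2 == 0:
--                 out.append("    :::python")
--         elif k % 2 == 1:
--             out.append("    %s" % line)
--         else:
--             out.append(line)
--     return "\n".join(out)
-- ===== Notes on version B (the rewrite author's own statement) =====
-- stated objective: alternative
-- what changed: Replaces A's single pass with a mutated boolean flag inside nested branches by a three-phase decomposition: mark fence lines, prefix-count the fences, then map each line by its fence flag and the parity of fences seen before it.
import Mathlib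
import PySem

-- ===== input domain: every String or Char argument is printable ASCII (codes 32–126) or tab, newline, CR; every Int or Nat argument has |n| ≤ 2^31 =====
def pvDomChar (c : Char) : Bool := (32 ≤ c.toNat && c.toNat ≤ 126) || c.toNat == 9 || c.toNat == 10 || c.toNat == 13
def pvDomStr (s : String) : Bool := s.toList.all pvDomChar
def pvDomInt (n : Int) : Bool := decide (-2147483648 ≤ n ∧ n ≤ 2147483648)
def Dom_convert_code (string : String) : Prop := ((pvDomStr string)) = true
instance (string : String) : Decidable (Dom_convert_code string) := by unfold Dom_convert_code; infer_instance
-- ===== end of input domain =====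

-- B replaces A's nested-branch boolean toggle by a two-phase decomposition (mark fences,
-- prefix-count them, map each line by fence-flag and parity); objective: alternative, same cost.

-- ===== PORT A =====
def convert_code (string : String) : String :=
  let lines := PySem.Str.splitlines string
  let res := lines.foldl (fun (st : List String × Bool) line =>
    if st.2 then
      if PySem.Str.startswith line "~~~~" then (st.1, false)
      else (st.1 ++ ["    " ++ line], st.2)
    else if PySem.Str.startswith line "~~~~" then
      (st.1 ++ ["    :::python"], true)
    else (st.1 ++ [line], st.2)) ([], false)
  PySem.Str.join "\n" res.1

-- ===== PORT B =====
def convert_code_alt (string : String) : String :=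
  let lines := PySem.Str.splitlines string
  let fences := lines.map (fun l => PySem.Str.startswith l "~~~~")
  let cc := fences.foldl (fun (st : List Int × Int) f =>
      (st.1 ++ [st.2], st.2 + (if f then 1 else 0))) ([], 0)
  let out := (lines.zip (fences.zip cc.1)).foldl (fun out p =>
      if p.2.1 then
        (if PySem.Int.mod p.2.2 2 == 0 then out ++ ["    :::python"] else out)
      else if PySem.Int.mod p.2.2 2 == 1 then out ++ ["    " ++ p.1]
      else out ++ [p.1]) []
  PySem.Str.join "\n" out

-- ===== PRECONDITION & SPEC =====
def Spec_convert_code (string : String) (out : String) : Prop := out = convert_code_alt string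
instance (string : String) (out : String) : Decidable (Spec_convert_code string out) := by unfold Spec_convert_code; infer_instance

-- ===== CLAIM (what is proved, stated in full; the proofs are below) =====
def Claim_equal_convert_code : Prop := ∀ (string : String), Dom_convert_code string → Spec_convert_code string (convert_code string)

-- ===== LEMMAS AND PROOFS =====

-- common shape: the converted line list, parameterised by the fence test and the in-code-block flag
def pvConv (p : String → Bool) : List String → Bool → List String
  | [], _ => []
  | l :: ls, b =>
    if p l then
      (if b then pvConv p ls false else "    :::python" :: pvConv p ls true)
    else (if b then "    " ++ l else l) :: pvConv p ls b

theorem pvA_foldl (p : String → Bool) (ls : List String) (acc : List String) (b : Bool) :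
    (ls.foldl (fun (st : List String × Bool) line =>
      if st.2 then
        if p line then (st.1, false)
        else (st.1 ++ ["    " ++ line], st.2)
      else if p line then
        (st.1 ++ ["    :::python"], true)
      else (st.1 ++ [line], st.2)) (acc, b)).1 = acc ++ pvConv p ls b := by
  induction ls generalizing acc b with
  | nil => simp [pvConv]
  | cons l ls ih =>
    cases b <;> cases h : p l <;>
      simp [pvConv, h, List.foldl_cons, ih]

def pvCounts : List Bool → Int → List Int
  | [], _ => []
  | f :: fs, c => c :: pvCounts fs (c + (if f then 1 else 0))

theorem pvCounts_foldl (fs : List Bool) (acc : List Int) (c : Int) :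
    (fs.foldl (fun (st : List Int × Int) f =>
      (st.1 ++ [st.2], st.2 + (if f then 1 else 0))) (acc, c)).1
    = acc ++ pvCounts fs c := by
  induction fs generalizing acc c with
  | nil => simp [pvCounts]
  | cons f fs ih => cases f <;> simp [pvCounts, List.foldl_cons, ih]

theorem pvB_foldl (p : String → Bool) (ls : List String) (acc : List String) (c : Int)
    (hc : 0 ≤ c) :
    ((ls.zip ((ls.map p).zip (pvCounts (ls.map p) c))).foldl
      (fun out q =>
        if q.2.1 then
          (if PySem.Int.mod q.2.2 2 == 0 then out ++ ["    :::python"] else out)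
        else if PySem.Int.mod q.2.2 2 == 1 then out ++ ["    " ++ q.1]
        else out ++ [q.1]) acc)
    = acc ++ pvConv p ls (decide (PySem.Int.mod c 2 = 1)) := by
  induction ls generalizing acc c with
  | nil => simp [pvConv]
  | cons l ls ih =>
    have hm : PySem.Int.mod c 2 = c % 2 := PySem.Int.mod_eq_emod_of_pos (by omega)
    have hm' : PySem.Int.mod (c + 1) 2 = (c + 1) % 2 :=
      PySem.Int.mod_eq_emod_of_pos (by omega)
    simp at ih
    cases h : p l
    · rcases Int.emod_two_eq_zero_or_one c with h2 | h2 <;>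
        simp [pvConv, h, List.map_cons, pvCounts, List.zip_cons_cons, h2, ih _ c hc]
    · rcases Int.emod_two_eq_zero_or_one c with h2 | h2
      · simp [pvConv, h, List.map_cons, pvCounts, List.zip_cons_cons, h2,
              ih _ (c + 1) (by omega), show (c + 1) % 2 = 1 by omega, show (2:Int) ∣ c by omega]
      · simp [pvConv, h, List.map_cons, pvCounts, List.zip_cons_cons, h2,
              ih _ (c + 1) (by omega), show (c + 1) % 2 = 0 by omega, show ¬(2:Int) ∣ c by omega]

-- ===== VERDICT (by name: the statement is the Claim_ definition above) =====
theorem convert_code_spec : Claim_equal_convert_code := by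
  intro string _
  unfold Spec_convert_code convert_code convert_code_alt
  simp only [pvA_foldl (fun l => PySem.Str.startswith l "~~~~"), pvCounts_foldl,
    pvB_foldl (fun l => PySem.Str.startswith l "~~~~") _ _ 0 (by omega), List.nil_append]
  rfl
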